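-- pv_equiv track=rewrite | github.com/daneel95/Master_Homework | SecondYear/ComputerVision/Homework1/calculate_mark.py | remove_redundant_vertical_lines
-- ===== SOURCE A (Python) =====
-- def remove_redundant_vertical_lines(vertical, threshold):
--     # remove redundant vertical lines
--     to_remove = []
--
--     for i in range(1, len(vertical)):
--         x1 = vertical[i - 1][0]
--         x2 = vertical[i][0]
--
--         if abs(x2 - x1) < threshold:
--             to_remove.append(i - 1)
--
--     new_verticals = []
--     for i, el in enumerate(vertical):
--         if i not in to_remove:
--             new_verticals.append(el)
--
--     return new_verticals
-- ===== SOURCE B (Python) =====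
-- def remove_redundant_vertical_lines(vertical, threshold):
--     # Run-compression state machine: walk the list once carrying the pending last
--     # line of the current run of too-close neighbours; when a gap >= threshold (or
--     # the input ends) the run closes and its last line is emitted.
--     result = []
--     pending = None
--     for line in vertical:
--         if pending is not None and abs(line[0] - pending[0]) < threshold:
--             pending = line            # same run: previous pending line is discarded
--         else:
--             if pending is not None:
--                 result.append(pending)  # run closed: emit its last line
--             pending = line              # start a new run
--     if pending is not None:
--         result.append(pending)
--     return result
-- ===== Notes on version B (the rewrite author's own statement) =====
-- stated objective: simpler
-- what changed: Replaces A's two staged passes (build a to_remove index list, then re-scan filtering by 'i not in to_remove') by a single-pass run-compression state machine that groups consecutive lines into maximal runs of too-close neighbours and emits only the last line of each run; no index list and no membership test exist in B.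
import Mathlib
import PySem

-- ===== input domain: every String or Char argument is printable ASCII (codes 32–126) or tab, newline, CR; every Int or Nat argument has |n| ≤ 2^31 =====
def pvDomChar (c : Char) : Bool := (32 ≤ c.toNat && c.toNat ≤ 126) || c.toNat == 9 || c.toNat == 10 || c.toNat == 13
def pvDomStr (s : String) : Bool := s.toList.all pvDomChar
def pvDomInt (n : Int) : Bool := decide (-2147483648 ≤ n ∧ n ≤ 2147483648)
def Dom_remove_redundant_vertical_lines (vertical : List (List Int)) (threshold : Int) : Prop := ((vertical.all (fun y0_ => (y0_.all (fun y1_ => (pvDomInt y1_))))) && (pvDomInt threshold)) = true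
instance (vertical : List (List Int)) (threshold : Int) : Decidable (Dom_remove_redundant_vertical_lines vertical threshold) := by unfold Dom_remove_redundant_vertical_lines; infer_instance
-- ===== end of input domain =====

-- B replaces A's two passes (to_remove index list + membership re-scan) by a single-pass
-- run-compression state machine emitting the last line of each run of too-close neighbours: simpler.


-- ===== PORT A =====
def remove_redundant_vertical_lines (vertical : List (List Int)) (threshold : Int) : List (List Int) :=
  let to_remove : List Int :=
    (PySem.List.pyRange 1 (vertical.length : Int) 1).foldl (fun acc i =>
      let x1 := PySem.List.pyGetD (PySem.List.pyGetD vertical (i - 1) []) 0 0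
      let x2 := PySem.List.pyGetD (PySem.List.pyGetD vertical i []) 0 0
      if |x2 - x1| < threshold then acc ++ [i - 1] else acc) []
  (PySem.List.enumerate vertical).foldl (fun acc p =>
    if p.1 ∈ to_remove then acc else acc ++ [p.2]) []

-- ===== PORT B =====
-- state = (result so far, pending last line of the current run)
def remove_redundant_vertical_lines_alt (vertical : List (List Int)) (threshold : Int) : List (List Int) :=
  let st := vertical.foldl
    (fun (st : List (List Int) × Option (List Int)) line =>
      match st.2 with
      | some pending =>
          if |PySem.List.pyGetD line 0 0 - PySem.List.pyGetD pending 0 0| < threshold then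
            (st.1, some line)
          else
            (st.1 ++ [pending], some line)
      | none => (st.1, some line))
    ([], none)
  match st.2 with
  | some pending => st.1 ++ [pending]
  | none => st.1

-- ===== PRECONDITION & SPEC =====
-- Pre_ excludes exactly the inputs where Python A raises IndexError: when there are at least
-- two lines, A reads row[0] of every row, so every row must be nonempty.
def Pre_remove_redundant_vertical_lines (vertical : List (List Int)) (threshold : Int) : Prop :=
  vertical.length ≤ 1 ∨ ∀ r ∈ vertical, r ≠ []
instance (vertical : List (List Int)) (threshold : Int) : Decidable (Pre_remove_redundant_vertical_lines vertical threshold) := by unfold Pre_remove_redundant_vertical_lines; infer_instance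

def pvWitness_remove_redundant_vertical_lines : List (List Int) × Int := ([[0], [10, 1], [12]], 5)

def Spec_remove_redundant_vertical_lines (vertical : List (List Int)) (threshold : Int) (out : List (List Int)) : Prop := out = remove_redundant_vertical_lines_alt vertical threshold
instance (vertical : List (List Int)) (threshold : Int) (out : List (List Int)) : Decidable (Spec_remove_redundant_vertical_lines vertical threshold out) := by unfold Spec_remove_redundant_vertical_lines; infer_instance

-- ===== CLAIM (what is proved, stated in full; the proofs are below) =====
def Claim_equal_remove_redundant_vertical_lines : Prop := ∀ (vertical : List (List Int)) (threshold : Int), Dom_remove_redundant_vertical_lines vertical threshold → Pre_remove_redundant_vertical_lines vertical threshold → Spec_remove_redundant_vertical_lines vertical threshold (remove_redundant_vertical_lines vertical threshold)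

-- ===== LEMMAS AND PROOFS =====

-- x-coordinate of a row (both ports read row[0] this way)
def pvX (r : List Int) : Int := PySem.List.pyGetD r 0 0

-- reference recursion: keep a row iff it is last or the next row's x is far enough
def pvCore (t : Int) : List (List Int) → List (List Int)
  | [] => []
  | [x] => [x]
  | x :: y :: rest => (if |pvX y - pvX x| < t then [] else [x]) ++ pvCore t (y :: rest)

-- keep-decision for index k of v
def pvKeep (t : Int) (v : List (List Int)) (k : Nat) : Bool :=
  decide (k = v.length - 1) || decide (t ≤ |pvX (v.getD (k + 1) []) - pvX (v.getD k [])|)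

theorem pvKeep_shift (t : Int) (x y : List Int) (rest : List (List Int)) (k : Nat) :
    pvKeep t (x :: y :: rest) (k + 1) = pvKeep t (y :: rest) k := by
  simp only [pvKeep, List.getD_cons_succ, List.length_cons]
  congr 1
  simp only [decide_eq_decide]
  omega

-- B's fold, from a state with a pending line, produces acc ++ pvCore of (pending :: remaining)
theorem pvFoldB (t : Int) : ∀ (l : List (List Int)) (acc : List (List Int)) (x : List Int),
    (match (l.foldl
      (fun (st : List (List Int) × Option (List Int)) line =>
        match st.2 with
        | some pending =>
            if |PySem.List.pyGetD line 0 0 - PySem.List.pyGetD pending 0 0| < t then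
              (st.1, some line)
            else
              (st.1 ++ [pending], some line)
        | none => (st.1, some line))
      (acc, some x)).2 with
     | some pending => (l.foldl
      (fun (st : List (List Int) × Option (List Int)) line =>
        match st.2 with
        | some pending =>
            if |PySem.List.pyGetD line 0 0 - PySem.List.pyGetD pending 0 0| < t then
              (st.1, some line)
            else
              (st.1 ++ [pending], some line)
        | none => (st.1, some line))
      (acc, some x)).1 ++ [pending]
     | none => (l.foldl
      (fun (st : List (List Int) × Option (List Int)) line =>
        match st.2 with
        | some pending =>
            if |PySem.List.pyGetD line 0 0 - PySem.List.pyGetD pending 0 0| < t then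
              (st.1, some line)
            else
              (st.1 ++ [pending], some line)
        | none => (st.1, some line))
      (acc, some x)).1) = acc ++ pvCore t (x :: l)
  | [], acc, x => by simp [pvCore]
  | y :: rest, acc, x => by
    have ih1 := pvFoldB t rest acc y
    have ih2 := pvFoldB t rest (acc ++ [x]) y
    simp only [List.foldl_cons]
    by_cases h : |pvX y - pvX x| < t
    · have h' : |PySem.List.pyGetD y 0 0 - PySem.List.pyGetD x 0 0| < t := by simpa [pvX] using h
      simp only [h', if_pos, pvCore, h, List.nil_append]
      simpa [pvCore] using ih1
    · have h' : ¬ |PySem.List.pyGetD y 0 0 - PySem.List.pyGetD x 0 0| < t := by simpa [pvX] using h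
      simp only [h', if_neg, not_false_iff, pvCore, h, if_neg]
      simpa [pvCore, List.append_assoc] using ih2

theorem pvCore_B (t : Int) (v : List (List Int)) :
    remove_redundant_vertical_lines_alt v t = pvCore t v := by
  cases v with
  | nil => simp [remove_redundant_vertical_lines_alt, pvCore]
  | cons x l =>
    unfold remove_redundant_vertical_lines_alt
    simp only [List.foldl_cons]
    simpa using pvFoldB t l [] x

-- the generic second pass of A: filtering an enumerate-fold by a membership list L
theorem pvFoldA (t : Int) (L : List Int) :
    ∀ (v : List (List Int)) (s : Int) (init : List (List Int)),
    (∀ k : Nat, k < v.length → ((s + (k : Int)) ∈ L ↔ pvKeep t v k = false)) →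
    (PySem.List.enumerate v s).foldl
      (fun acc p => if p.1 ∈ L then acc else acc ++ [p.2]) init = init ++ pvCore t v
  | [], s, init, _ => by simp [PySem.List.enumerate_nil, pvCore]
  | [x], s, init, h => by
    have h0 := h 0 (by simp)
    simp only [Nat.cast_zero, add_zero, pvKeep] at h0
    have hs : s ∉ L := by
      intro hm
      have := h0.mp hm
      simp at this
    simp [PySem.List.enumerate_cons, PySem.List.enumerate_nil, pvCore, hs]
  | x :: y :: rest, s, init, h => by
    have h0 := h 0 (by simp)
    simp only [Nat.cast_zero, add_zero, pvKeep, List.getD_cons_succ, List.getD_cons_zero,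
      List.length_cons] at h0
    have h0' : s ∈ L ↔ ¬ t ≤ |pvX ((y :: rest).getD 0 []) - pvX x| := by
      rw [h0]
      simp only [Bool.or_eq_false_iff, decide_eq_false_iff_not]
      constructor
      · exact fun hp => hp.2
      · exact fun hp => ⟨by omega, hp⟩
    have ih := pvFoldA t L (y :: rest) (s + 1)
      (if s ∈ L then init else init ++ [x])
      (by
        intro k hk
        have hk1 := h (k + 1) (by simpa using Nat.succ_lt_succ hk)
        rw [pvKeep_shift] at hk1
        have : s + 1 + (k : Int) = s + ((k : Nat) + 1 : Nat) := by push_cast; ring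
        rw [this, hk1])
    rw [PySem.List.enumerate_cons]
    simp only [List.foldl_cons]
    rw [ih]
    simp only [List.getD_cons_zero] at h0'
    by_cases hm : s ∈ L
    · rw [if_pos hm]
      have : |pvX y - pvX x| < t := not_le.mp (h0'.mp hm)
      simp [pvCore, this]
    · rw [if_neg hm]
      have : ¬ |pvX y - pvX x| < t := by
        intro hlt
        exact hm (h0'.mpr (not_le.mpr hlt))
      simp [pvCore, this, List.append_assoc]

-- characterisation of A's to_remove list
theorem pvMem_TR (t : Int) (v : List (List Int)) (j : Int) :
    j ∈ (PySem.List.pyRange 1 (v.length : Int) 1).foldl (fun acc i =>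
      let x1 := PySem.List.pyGetD (PySem.List.pyGetD v (i - 1) []) 0 0
      let x2 := PySem.List.pyGetD (PySem.List.pyGetD v i []) 0 0
      if |x2 - x1| < t then acc ++ [i - 1] else acc) [] ↔
    ∃ k : Nat, k + 2 ≤ v.length ∧ j = (k : Int) ∧
      |pvX (v.getD (k + 1) []) - pvX (v.getD k [])| < t := by
  rw [show (fun acc i =>
      let x1 := PySem.List.pyGetD (PySem.List.pyGetD v (i - 1) []) 0 0
      let x2 := PySem.List.pyGetD (PySem.List.pyGetD v i []) 0 0
      if |x2 - x1| < t then acc ++ [i - 1] else acc) = (fun (acc : List Int) i =>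
      if (decide (|PySem.List.pyGetD (PySem.List.pyGetD v i []) 0 0 -
          PySem.List.pyGetD (PySem.List.pyGetD v (i - 1) []) 0 0| < t)) = true
        then acc ++ [(fun i => i - 1) i] else acc) from by
    funext acc i; simp]
  rw [PySem.List.foldl_append_if]
  simp only [List.nil_append, List.mem_map, List.mem_filter, PySem.List.mem_pyRange_one,
    decide_eq_true_eq]
  constructor
  · rintro ⟨i, ⟨⟨h1, h2⟩, hlt⟩, rfl⟩
    refine ⟨(i - 1).toNat, by omega, by omega, ?_⟩
    have e1 : PySem.List.pyGetD v (i - 1) [] = v.getD (i - 1).toNat [] := by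
      rw [show i - 1 = (((i - 1).toNat : Nat) : Int) from by omega, PySem.List.pyGetD_natCast]
      simp
    have e2 : PySem.List.pyGetD v i [] = v.getD ((i - 1).toNat + 1) [] := by
      rw [show i = ((((i - 1).toNat + 1 : Nat)) : Int) from by omega, PySem.List.pyGetD_natCast]
      simp
    rw [e1, e2] at hlt
    simpa [pvX] using hlt
  · rintro ⟨k, hk, rfl, hlt⟩
    refine ⟨(k : Int) + 1, ⟨⟨by omega, by omega⟩, ?_⟩, by ring⟩
    have e1 : PySem.List.pyGetD v ((k : Int) + 1 - 1) [] = v.getD k [] := by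
      rw [show (k : Int) + 1 - 1 = ((k : Nat) : Int) from by ring, PySem.List.pyGetD_natCast]
    have e2 : PySem.List.pyGetD v ((k : Int) + 1) [] = v.getD (k + 1) [] := by
      rw [show (k : Int) + 1 = (((k + 1 : Nat)) : Int) from by push_cast; ring,
        PySem.List.pyGetD_natCast]
    rw [e1, e2]
    simpa [pvX] using hlt

theorem pvCore_A (t : Int) (v : List (List Int)) :
    remove_redundant_vertical_lines v t = pvCore t v := by
  unfold remove_redundant_vertical_lines
  refine (pvFoldA t _ v 0 [] ?_).trans (by simp)
  intro k hk
  rw [zero_add, pvMem_TR]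
  simp only [pvKeep, Bool.or_eq_false_iff, decide_eq_false_iff_not, not_le]
  constructor
  · rintro ⟨m, hm, he, hlt⟩
    have : m = k := by omega
    subst this
    exact ⟨by omega, hlt⟩
  · rintro ⟨hne, hlt⟩
    exact ⟨k, by omega, rfl, hlt⟩

-- ===== VERDICT (by name: the statement is the Claim_ definition above) =====
theorem remove_redundant_vertical_lines_spec : Claim_equal_remove_redundant_vertical_lines := by
  intro v t _ _
  unfold Spec_remove_redundant_vertical_lines
  rw [pvCore_A, pvCore_B]
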